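-- pv_equiv track=rewrite | github.com/PlanXLab/upyboard | device/ticle/src/ext/vl53l0x.py | __encode_timeout
-- ===== SOURCE A (Python) =====
-- def __encode_timeout(timeout_mclks):
--     if timeout_mclks <= 0:
--         return 0
--     ls = int(timeout_mclks) - 1
--     ms = 0
--     while ls > 255:
--         ls >>= 1
--         ms += 1
--     return ((ms << 8) | (ls & 0xFF)) & 0xFFFF
-- ===== SOURCE B (Python) =====
-- def __encode_timeout(timeout_mclks):
--     if timeout_mclks <= 0:
--         return 0
--     ls = int(timeout_mclks) - 1
--     ms = max(0, ls.bit_length() - 8)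
--     ls >>= ms
--     return ((ms << 8) | (ls & 0xFF)) & 0xFFFF
-- ===== Notes on version B (the rewrite author's own statement) =====
-- stated objective: idiomatic
-- what changed: Replaces the shift-and-count while loop with a closed-form exponent computed from the mantissa's bit length (ms = max(0, (ls).bit_length() - 8)) followed by a single shift.
import Mathlib
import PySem

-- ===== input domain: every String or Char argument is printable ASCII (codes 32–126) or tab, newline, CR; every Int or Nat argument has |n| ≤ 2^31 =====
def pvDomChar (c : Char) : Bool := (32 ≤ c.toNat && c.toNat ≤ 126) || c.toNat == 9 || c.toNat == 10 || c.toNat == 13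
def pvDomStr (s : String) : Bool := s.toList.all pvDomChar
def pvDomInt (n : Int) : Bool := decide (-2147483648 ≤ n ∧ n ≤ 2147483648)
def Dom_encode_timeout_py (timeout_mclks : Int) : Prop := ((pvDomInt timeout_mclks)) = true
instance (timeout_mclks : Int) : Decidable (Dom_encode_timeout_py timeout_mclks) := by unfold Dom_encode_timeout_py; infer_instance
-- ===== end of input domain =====

-- B replaces A's shift-and-count while loop by a closed-form exponent from the mantissa's
-- bit length (idiomatic; same exact results).

-- ===== PORT A =====
-- the `while ls > 255: ls >>= 1; ms += 1` loop; state (ls, ms).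
-- ls is nonnegative whenever the loop is entered, so recursion on ls.toNat terminates.
def encLoopA (ls ms : Int) : Int × Int :=
  if 255 < ls then encLoopA (ls >>> (1:Nat)) (ms + 1) else (ls, ms)
termination_by ls.toNat
decreasing_by
  have h1 : ls >>> (1:Nat) = ls / 2 := by simp [Int.shiftRight_eq_div_pow]
  omega

def encode_timeout_py (timeout_mclks : Int) : Int :=
  if timeout_mclks ≤ 0 then 0
  else
    let p := encLoopA (timeout_mclks - 1) 0
    Int.land (Int.lor (p.2 <<< (8:Nat)) (Int.land p.1 0xFF)) 0xFFFF  -- &, |, & with Int.land/lor (exact for Python's int bitops)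

-- ===== PORT B =====
-- Python `ls.bit_length()` for a nonnegative int; exact since in B's branch ls = t-1 ≥ 0,
-- represented on Nat (toNat is exact there).
def pyBitLength (n : Nat) : Nat := if n = 0 then 0 else n.log2 + 1

def encode_timeout_py_alt (timeout_mclks : Int) : Int :=
  if timeout_mclks ≤ 0 then 0
  else
    let n : Nat := (timeout_mclks - 1).toNat
    let ms : Nat := pyBitLength n - 8        -- Nat subtraction = max(0, bit_length - 8)
    let ls : Nat := n >>> ms
    Int.land (Int.lor ((ms : Int) <<< (8:Nat)) (Int.land (ls : Int) 0xFF)) 0xFFFF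

-- ===== PRECONDITION & SPEC =====
def Spec_encode_timeout_py (timeout_mclks : Int) (out : Int) : Prop := out = encode_timeout_py_alt timeout_mclks
instance (timeout_mclks : Int) (out : Int) : Decidable (Spec_encode_timeout_py timeout_mclks out) := by unfold Spec_encode_timeout_py; infer_instance

-- ===== CLAIM (what is proved, stated in full; the proofs are below) =====
def Claim_equal_encode_timeout_py : Prop := ∀ (timeout_mclks : Int), Dom_encode_timeout_py timeout_mclks → Spec_encode_timeout_py timeout_mclks (encode_timeout_py timeout_mclks)

-- ===== LEMMAS AND PROOFS =====

theorem encLoopA_char (n : Nat) : ∀ ms : Int,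
    encLoopA (n : Int) ms = (((n >>> (pyBitLength n - 8) : Nat) : Int), ms + ((pyBitLength n - 8 : Nat) : Int)) := by
  induction n using Nat.strong_induction_on with
  | _ n ih =>
    intro ms
    by_cases h : 255 < n
    · have hn0 : n ≠ 0 := by omega
      -- one loop step
      rw [encLoopA]
      have hcast : (n : Int) >>> (1:Nat) = ((n >>> 1 : Nat) : Int) := by
        push_cast; ring
      have hlt : 255 < (n : Int) := by exact_mod_cast h
      rw [if_pos hlt, hcast, ih (n >>> 1) (by simp [Nat.shiftRight_one]; omega)]
      -- bit length of n/2 is one less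
      have hbl : pyBitLength (n >>> 1) = pyBitLength n - 1 := by
        have h2 : 2 ≤ n := by omega
        have := Nat.log2_def n
        simp only [pyBitLength, Nat.shiftRight_one]
        rw [if_neg (by omega : ¬ n / 2 = 0), if_neg hn0, this, if_pos h2]
        omega
      have hge : 9 ≤ pyBitLength n := by
        simp only [pyBitLength, if_neg hn0]
        have : 8 ≤ n.log2 := Nat.le_log2 (by omega) |>.mpr (by omega)
        omega
      have hshift : n >>> (pyBitLength n - 8) = (n >>> 1) >>> (pyBitLength n - 1 - 8) := by
        rw [show pyBitLength n - 8 = 1 + (pyBitLength n - 1 - 8) by omega, Nat.shiftRight_add]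
      rw [hbl, hshift]
      have hms : ms + 1 + ((pyBitLength n - 1 - 8 : ℕ) : ℤ) = ms + ((pyBitLength n - 8 : ℕ) : ℤ) := by
        omega
      rw [hms]
    · -- loop exits: bit length ≤ 8, shift by 0
      have hbl : pyBitLength n - 8 = 0 := by
        by_cases hn0 : n = 0
        · simp [pyBitLength, hn0]
        · have : n.log2 < 8 := (Nat.log2_lt hn0).mpr (by omega)
          simp only [pyBitLength, if_neg hn0]; omega
      rw [encLoopA, if_neg (by exact_mod_cast h), hbl]
      simp

theorem encode_timeout_py_eq (t : Int) : encode_timeout_py t = encode_timeout_py_alt t := by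
  unfold encode_timeout_py encode_timeout_py_alt
  by_cases h : t ≤ 0
  · rw [if_pos h, if_pos h]
  · rw [if_neg h, if_neg h]
    have hcast : t - 1 = (((t - 1).toNat : Nat) : Int) := by omega
    rw [hcast, encLoopA_char]
    simp [Int.toNat_natCast]

-- ===== VERDICT (by name: the statement is the Claim_ definition above) =====
theorem encode_timeout_py_spec : Claim_equal_encode_timeout_py := by
  intro t _
  exact encode_timeout_py_eq t
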